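-- pv_equiv track=rewrite | github.com/zyan-y/SmartCut | SmartCut/utlis.py | idx_to_oligo
-- ===== SOURCE A (Python) =====
-- def rev_comp(s):
--     bp = {'A':'T', 'T':'A', 'G':'C', 'C':'G'}
--     sc = ''.join(bp[i] for i in reversed(s))
--     return sc
--
-- def idx_to_oligo(sequence, preds):
--     oligos = []
--     primers = []
--     for i in range(len(preds)):
--         if i == 0:
--             oligo = sequence[:preds[i][1]]
--         else:
--             oligo = sequence[preds[i-1][0]:preds[i][1]]
--         if (i%2) != 0:
--             oligo = rev_comp(oligo)
--         oligos.append(oligo)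
--         primers.append(sequence[preds[i][0]:preds[i][1]])
--     oligos.append(rev_comp(sequence[preds[i][0]:]))
--     return oligos, primers
-- ===== SOURCE B (Python) =====
-- def rev_comp(s):
--     bp = {'A':'T', 'T':'A', 'G':'C', 'C':'G'}
--     sc = ''.join(bp[i] for i in reversed(s))
--     return sc
--
-- def idx_to_oligo(sequence, preds):
--     # Pairwise (stride-2) consumption: each iteration handles one plain oligo and
--     # one reverse-complemented oligo, so no parity test or index arithmetic is needed.
--     oligos = []
--     prev = 0
--     it = iter(preds)
--     for even in it:
--         oligos.append(sequence[prev:even[1]])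
--         odd = next(it, None)
--         if odd is None:
--             break
--         oligos.append(rev_comp(sequence[even[0]:odd[1]]))
--         prev = odd[0]
--     oligos.append(rev_comp(sequence[preds[-1][0]:]))
--     primers = [sequence[a:b] for a, b in preds]
--     return oligos, primers
-- ===== Notes on version B (the rewrite author's own statement) =====
-- stated objective: alternative
-- what changed: Replaces A's indexed loop that branches on i==0 and i%2 at every step (and reads the leftover loop variable after the loop) by a pairwise stride-2 consumption of preds: each iteration emits one plain oligo and one reverse-complemented oligo directly, so no parity test or index arithmetic remains; primers are an independent map over preds.
import Mathlib
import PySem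

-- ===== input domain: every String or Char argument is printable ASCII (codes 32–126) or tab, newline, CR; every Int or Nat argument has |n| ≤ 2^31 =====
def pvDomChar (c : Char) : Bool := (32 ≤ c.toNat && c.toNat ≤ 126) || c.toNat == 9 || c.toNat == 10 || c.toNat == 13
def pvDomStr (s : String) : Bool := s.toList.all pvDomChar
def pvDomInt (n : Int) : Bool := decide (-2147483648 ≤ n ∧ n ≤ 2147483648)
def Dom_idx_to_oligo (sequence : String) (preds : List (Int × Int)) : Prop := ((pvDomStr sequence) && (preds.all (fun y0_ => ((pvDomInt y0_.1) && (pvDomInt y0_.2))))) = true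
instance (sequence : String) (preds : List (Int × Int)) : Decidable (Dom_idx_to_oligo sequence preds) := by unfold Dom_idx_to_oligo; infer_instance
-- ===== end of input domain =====

-- B replaces A's indexed loop (branching on i==0 and i%2 at every step) by a pairwise
-- stride-2 consumption of preds: each iteration emits one plain oligo and one
-- reverse-complemented oligo, so no parity test or index arithmetic remains; same cost.

-- ===== PORT A =====
-- ''.join(bp[i] for i in reversed(s)); bp[i] would raise KeyError on a char outside
-- 'ATGC' — those inputs are excluded by Pre_, so the .getD fallback is never reached there.
def rev_comp (s : String) : String :=
  let bp : PySem.Dict Char Char := ⟨[('A','T'),('T','A'),('G','C'),('C','G')]⟩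
  String.ofList (s.toList.reverse.map (fun c => (PySem.Dict.get? bp c).getD c))

def idx_to_oligo (sequence : String) (preds : List (Int × Int)) : List String × List String :=
  let cs := sequence.toList
  let st := (List.range preds.length).foldl
    (fun (acc : List String × List String) i =>
      let oligo :=
        if i == 0 then String.ofList (PySem.List.slice cs none (some (preds.getD i (0,0)).2))
        else String.ofList (PySem.List.slice cs (some (preds.getD (i-1) (0,0)).1) (some (preds.getD i (0,0)).2))
      let oligo := if i % 2 != 0 then rev_comp oligo else oligo
      (acc.1 ++ [oligo],
       acc.2 ++ [String.ofList (PySem.List.slice cs (some (preds.getD i (0,0)).1) (some (preds.getD i (0,0)).2))]))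
    ([], [])
  -- after the loop Python's i holds len(preds)-1; empty preds (NameError) is excluded by Pre_
  (st.1 ++ [rev_comp (String.ofList (PySem.List.slice cs (some (preds.getD (preds.length-1) (0,0)).1) none))], st.2)

-- ===== PORT B =====
-- the stride-2 'for even in it: … odd = next(it, None) …' loop of Source B, as
-- two-at-a-time structural recursion carrying the running start position
def altPairs (cs : List Char) (prev : Int) : List (Int × Int) → List String
  | [] => []
  | [e] => [String.ofList (PySem.List.slice cs (some prev) (some e.2))]
  | e :: o :: rest =>
      String.ofList (PySem.List.slice cs (some prev) (some e.2)) ::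
      rev_comp (String.ofList (PySem.List.slice cs (some e.1) (some o.2))) ::
      altPairs cs o.1 rest

def idx_to_oligo_alt (sequence : String) (preds : List (Int × Int)) : List String × List String :=
  let cs := sequence.toList
  -- sequence[preds[-1][0]:]; empty preds (IndexError in Source B) is excluded by Pre_
  let tail := rev_comp (String.ofList (PySem.List.slice cs (some ((PySem.List.pyGet? preds (-1)).getD (0,0)).1) none))
  let primers := preds.map (fun p => String.ofList (PySem.List.slice cs (some p.1) (some p.2)))
  (altPairs cs 0 preds ++ [tail], primers)

-- ===== PRECONDITION & SPEC =====
-- Pre_ excludes exactly the inputs where Python A raises: empty preds (NameError from the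
-- trailing use of the loop variable) and inputs whose reverse-complemented slices contain a
-- character outside 'ATGC' (KeyError in rev_comp).
def atgcOnly (cs : List Char) : Bool := cs.all (fun c => ['A','T','G','C'].contains c)

def Pre_idx_to_oligo (sequence : String) (preds : List (Int × Int)) : Prop :=
  preds ≠ [] ∧
  (∀ i : Nat, i < preds.length → i % 2 = 1 →
     atgcOnly (PySem.List.slice sequence.toList (some (preds.getD (i-1) (0,0)).1) (some (preds.getD i (0,0)).2)) = true) ∧
  atgcOnly (PySem.List.slice sequence.toList (some (preds.getD (preds.length-1) (0,0)).1) none) = true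
instance (sequence : String) (preds : List (Int × Int)) : Decidable (Pre_idx_to_oligo sequence preds) := by unfold Pre_idx_to_oligo; infer_instance

def pvWitness_idx_to_oligo : String × (List (Int × Int)) := ("ACGT", [(0,2),(2,4)])

def Spec_idx_to_oligo (sequence : String) (preds : List (Int × Int)) (out : List String × List String) : Prop := out = idx_to_oligo_alt sequence preds
instance (sequence : String) (preds : List (Int × Int)) (out : List String × List String) : Decidable (Spec_idx_to_oligo sequence preds out) := by unfold Spec_idx_to_oligo; infer_instance

-- ===== CLAIM (what is proved, stated in full; the proofs are below) =====
def Claim_equal_idx_to_oligo : Prop := ∀ (sequence : String) (preds : List (Int × Int)), Dom_idx_to_oligo sequence preds → Pre_idx_to_oligo sequence preds → Spec_idx_to_oligo sequence preds (idx_to_oligo sequence preds)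

-- ===== LEMMAS AND PROOFS =====

-- the elements the pair recursion produces, as a function of the absolute index
lemma altPairs_eq (cs : List Char) : ∀ (l : List (Int × Int)) (start : Int),
    altPairs cs start l = (List.range l.length).map (fun k =>
      let a : Int := if k = 0 then start else (l.getD (k-1) (0,0)).1
      let s := String.ofList (PySem.List.slice cs (some a) (some (l.getD k (0,0)).2))
      if k % 2 = 1 then rev_comp s else s)
  | [], _ => by simp [altPairs]
  | [e], start => by simp [altPairs, List.range_succ]
  | e :: o :: rest, start => by
      rw [altPairs, altPairs_eq cs rest o.1]
      simp only [List.length_cons, List.range_succ_eq_map, List.map_cons, List.map_map]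
      refine congrArg₂ _ rfl (congrArg₂ _ rfl ?_)
      refine List.map_congr_left (fun k _ => ?_)
      rcases k with _ | j
      · simp
      · simp [Nat.succ_mod_two_eq_one_iff]

theorem idx_to_oligo_spec : Claim_equal_idx_to_oligo := by
  intro sequence preds _ hpre
  unfold Spec_idx_to_oligo
  simp only [idx_to_oligo, idx_to_oligo_alt]
  rw [PySem.List.foldl_prod_mk
      (fun (a : List String) (i : Nat) => a ++ [if i % 2 != 0 then
         rev_comp (if i == 0 then String.ofList (PySem.List.slice sequence.toList none (some (preds.getD i (0,0)).2))
           else String.ofList (PySem.List.slice sequence.toList (some (preds.getD (i-1) (0,0)).1) (some (preds.getD i (0,0)).2)))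
         else (if i == 0 then String.ofList (PySem.List.slice sequence.toList none (some (preds.getD i (0,0)).2))
           else String.ofList (PySem.List.slice sequence.toList (some (preds.getD (i-1) (0,0)).1) (some (preds.getD i (0,0)).2)))])
      (fun (a : List String) (i : Nat) => a ++ [String.ofList (PySem.List.slice sequence.toList (some (preds.getD i (0,0)).1) (some (preds.getD i (0,0)).2))])]
  rw [PySem.List.foldl_append_singleton_eq_map, PySem.List.foldl_append_singleton_eq_map]
  rw [altPairs_eq]
  simp only [List.nil_append, Prod.mk.injEq]
  constructor
  · -- oligos: the two element formulas agree at every index, and so do the tails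
    refine congrArg₂ _ (List.map_congr_left (fun k _ => ?_)) ?_
    · rcases k with _ | j
      · simp
      · rcases Nat.mod_two_eq_zero_or_one (j+1) with he | ho
        · simp [he]
        · simp [ho]
    · -- the trailing oligo: preds[-1] = preds[len-1] on nonempty preds
      rcases preds with _ | ⟨q, t⟩
      · exact absurd rfl hpre.1
      · have : PySem.List.pyGet? (q :: t) (-1) = some ((q :: t).getLast (by simp)) := by
          rw [PySem.List.pyGet?_neg_one, List.getLast?_eq_some_getLast]
        rw [this]
        simp only [Option.getD_some, List.getLast_eq_getElem, List.length_cons,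
              Nat.add_sub_cancel, List.getD_eq_getElem?_getD,
              List.getElem?_eq_getElem (by simp : t.length < (q :: t).length)]
        rfl
  · -- primers
    apply List.ext_getElem
    · simp
    · intro k h1 h2
      have hk : k < preds.length := by simpa using h2
      simp [List.getD_eq_getElem?_getD, List.getElem?_eq_getElem hk]
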